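-- pv_equiv track=rewrite | github.com/Dylkln/Projet_AIOI | aioi/test_stats.py | count_nt_pred_JP
-- ===== SOURCE A (Python) =====
-- def count_nt_pred_JP(jp_pred, data_train):
-- 	"""
--
-- 	"""
-- 	loops_pred_jp = [loop for loop in jp_pred["loop_pred"]]
-- 	sequences = [seq for seq in data_train["sequence"]]
--
-- 	loop_seq = {}
--
-- 	for i, loop in enumerate(loops_pred_jp):
-- 		for j, ltype in enumerate(loop):
-- 			if ltype not in loop_seq.keys():
-- 				loop_seq[ltype] = []
--
-- 			loop_seq[ltype].append(sequences[i][j])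
--
--
-- 	count_l_s = count_dict_loop_seq(loop_seq)
--
--
-- 	return count_l_s
--
-- def count_dict_loop_seq(loops_seq):
-- 	"""
--
-- 	"""
-- 	count_loop_seq = {}
--
-- 	for cle, valeur in loops_seq.items():
-- 		if cle not in count_loop_seq.keys():
-- 			count_loop_seq[cle] = {}
-- 			for val in valeur:
-- 				if val not in count_loop_seq[cle].keys():
-- 					count_loop_seq[cle][val] = 0
-- 				count_loop_seq[cle][val] += 1
--
-- 	return count_loop_seq
-- ===== SOURCE B (Python) =====
-- def count_nt_pred_JP(jp_pred, data_train):
-- 	"""Single pass: count nucleotides per predicted loop type directly in a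
-- 	nested counter dict, without building the intermediate per-type lists."""
-- 	sequences = data_train["sequence"]
-- 	counts = {}
-- 	for i, loop in enumerate(jp_pred["loop_pred"]):
-- 		for j, ltype in enumerate(loop):
-- 			nt = sequences[i][j]
-- 			inner = counts.setdefault(ltype, {})
-- 			inner[nt] = inner.get(nt, 0) + 1
-- 	return counts
-- ===== Notes on version B (the rewrite author's own statement) =====
-- stated objective: simpler
-- what changed: B counts in a single pass with a nested counter dict updated in place per (loop-type, nucleotide) event, instead of A's two phases that first group nucleotides into intermediate per-type lists and then count each list with a separate helper.
import Mathlib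
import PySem

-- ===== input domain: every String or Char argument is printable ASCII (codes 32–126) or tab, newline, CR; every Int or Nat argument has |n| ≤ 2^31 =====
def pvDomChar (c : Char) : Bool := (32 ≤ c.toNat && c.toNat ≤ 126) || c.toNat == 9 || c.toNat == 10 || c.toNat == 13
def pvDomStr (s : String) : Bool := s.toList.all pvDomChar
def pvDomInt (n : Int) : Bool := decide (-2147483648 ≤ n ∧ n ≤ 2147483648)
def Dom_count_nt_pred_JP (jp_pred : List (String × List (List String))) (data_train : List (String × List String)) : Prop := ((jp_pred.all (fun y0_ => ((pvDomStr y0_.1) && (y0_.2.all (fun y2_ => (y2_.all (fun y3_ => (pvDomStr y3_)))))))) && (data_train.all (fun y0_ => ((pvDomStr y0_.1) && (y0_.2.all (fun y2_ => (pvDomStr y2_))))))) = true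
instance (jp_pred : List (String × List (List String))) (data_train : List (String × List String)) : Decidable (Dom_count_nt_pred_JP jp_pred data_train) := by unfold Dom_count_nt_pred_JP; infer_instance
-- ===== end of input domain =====

-- B counts in a single pass with a nested counter dict instead of A's two phases
-- (group nucleotides into per-loop-type lists, then count each list); objective: simpler.

-- ===== PORT A =====
-- helper count_dict_loop_seq, as in the Python. The inner Python loop only ever reads and
-- writes count_loop_seq[cle], so that entry is built locally, step for step, and inserted.
def count_dict_loop_seq (loops_seq : PySem.Dict String (List String)) : PySem.Dict String (PySem.Dict String Int) :=
  loops_seq.items.foldl (fun c q =>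
    if c.contains q.1 = true then c
    else c.insert q.1 (q.2.foldl (fun m v =>
      (if m.contains v = true then m else m.insert v 0).modify v 0 (· + 1)) PySem.Dict.empty))
    PySem.Dict.empty

-- sequences[i][j] is ported with default-valued indexing: under Pre_ every such index is in
-- range; out of range Python raises IndexError (and KeyError on a missing key), excluded by Pre_.
def count_nt_pred_JP (jp_pred : List (String × List (List String))) (data_train : List (String × List String)) : List (String × List (String × Int)) :=
  match List.lookup "loop_pred" jp_pred, List.lookup "sequence" data_train with
  | some loops_pred_jp, some sequences =>
    let loop_seq : PySem.Dict String (List String) :=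
      (PySem.List.enumerate loops_pred_jp).foldl (fun d p =>
        (PySem.List.enumerate p.2).foldl (fun d q =>
          (if d.contains q.2 = true then d else d.insert q.2 []).modify q.2 []
            (fun l => l ++ [String.ofList [((sequences.getD p.1.toNat "").toList.getD q.1.toNat ' ')]])) d)
        PySem.Dict.empty
    (count_dict_loop_seq loop_seq).items.map (fun q => (q.1, q.2.items))
  | _, _ => []

-- ===== PORT B =====
def count_nt_pred_JP_alt (jp_pred : List (String × List (List String))) (data_train : List (String × List String)) : List (String × List (String × Int)) :=
  -- Source B reads data_train["sequence"] first, then iterates jp_pred["loop_pred"]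
  match List.lookup "sequence" data_train with
  | none => []
  | some sequences =>
    match List.lookup "loop_pred" jp_pred with
    | none => []
    | some loops =>
    ((PySem.List.enumerate loops).foldl (fun c p =>
        (PySem.List.enumerate p.2).foldl (fun c q =>
          -- nt = sequences[i][j]; counts.setdefault(ltype, {}); inner[nt] = inner.get(nt, 0) + 1
          c.modify q.2 PySem.Dict.empty (fun m =>
            m.insert (String.ofList [((sequences.getD p.1.toNat "").toList.getD q.1.toNat ' ')])
              ((m.getD (String.ofList [((sequences.getD p.1.toNat "").toList.getD q.1.toNat ' ')]) 0) + 1))) c)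
        (PySem.Dict.empty : PySem.Dict String (PySem.Dict String Int))).items.map (fun q => (q.1, q.2.items))

-- ===== PRECONDITION & SPEC =====
-- Pre_ excludes exactly the inputs where Python A raises: a missing "loop_pred"/"sequence" key
-- (KeyError), or a nonempty loop row whose row index or some position index falls outside the
-- corresponding sequence (IndexError).
def Pre_count_nt_pred_JP (jp_pred : List (String × List (List String))) (data_train : List (String × List String)) : Prop :=
  ((List.lookup "loop_pred" jp_pred).isSome &&
   (List.lookup "sequence" data_train).isSome &&
   (((List.lookup "loop_pred" jp_pred).getD []).zipIdx.all (fun p =>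
      p.1.isEmpty ||
        (decide (p.2 < ((List.lookup "sequence" data_train).getD []).length) &&
         decide (p.1.length ≤ ((((List.lookup "sequence" data_train).getD []).getD p.2 "").toList.length)))))) = true
instance (jp_pred : List (String × List (List String))) (data_train : List (String × List String)) : Decidable (Pre_count_nt_pred_JP jp_pred data_train) := by unfold Pre_count_nt_pred_JP; infer_instance

def pvWitness_count_nt_pred_JP : (List (String × List (List String))) × (List (String × List String)) :=
  ([("loop_pred", [["S", "E"], ["H"]])], [("sequence", ["GA", "C"])])

def Spec_count_nt_pred_JP (jp_pred : List (String × List (List String))) (data_train : List (String × List String)) (out : List (String × List (String × Int))) : Prop := out = count_nt_pred_JP_alt jp_pred data_train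
instance (jp_pred : List (String × List (List String))) (data_train : List (String × List String)) (out : List (String × List (String × Int))) : Decidable (Spec_count_nt_pred_JP jp_pred data_train out) := by unfold Spec_count_nt_pred_JP; infer_instance

-- ===== CLAIM (what is proved, stated in full; the proofs are below) =====
def Claim_equal_count_nt_pred_JP : Prop := ∀ (jp_pred : List (String × List (List String))) (data_train : List (String × List String)), Dom_count_nt_pred_JP jp_pred data_train → Pre_count_nt_pred_JP jp_pred data_train → Spec_count_nt_pred_JP jp_pred data_train (count_nt_pred_JP jp_pred data_train)

-- ===== LEMMAS AND PROOFS =====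
theorem pv_setdefault_modify {κ ν : Type} [BEq κ] [LawfulBEq κ] (d : PySem.Dict κ ν) (k : κ) (dflt : ν) (f : ν → ν) :
    (if d.contains k = true then d else d.insert k dflt).modify k dflt f = d.modify k dflt f := by
  split_ifs with h
  · rfl
  · rw [Bool.not_eq_true] at h
    simp only [PySem.Dict.modify, PySem.Dict.insert_insert_self]
    simp [pysem, h]

theorem pv_foldl_if_insert_fresh {κ ν β : Type} [BEq κ] [LawfulBEq κ] (l : List β) (k : β → κ) (v : β → ν)
    (d : PySem.Dict κ ν) (h1 : ∀ a ∈ l, d.contains (k a) = false) (h2 : (l.map k).Nodup) :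
    l.foldl (fun c a => if c.contains (k a) = true then c else c.insert (k a) (v a)) d
      = l.foldl (fun c a => c.insert (k a) (v a)) d := by
  induction l generalizing d with
  | nil => rfl
  | cons a l ih =>
    have ha := h1 a List.mem_cons_self
    simp only [List.foldl_cons, ha, Bool.false_eq_true, if_false]
    apply ih
    · intro b hb
      rw [PySem.Dict.contains_insert]
      simp only [List.map_cons, List.nodup_cons] at h2
      have hne : k b ≠ k a := fun he => h2.1 (he ▸ List.mem_map_of_mem hb)
      simp [hne, h1 b (List.mem_cons_of_mem _ hb)]
    · simp only [List.map_cons, List.nodup_cons] at h2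
      exact h2.2

theorem pv_nested {δ : Type} (l : List (Int × List String)) (nt : Int → Int → String)
    (step : δ → String × String → δ) (d : δ) :
    l.foldl (fun d p => (PySem.List.enumerate p.2).foldl (fun d q => step d (q.2, nt p.1 q.1)) d) d
      = (l.flatMap (fun p => (PySem.List.enumerate p.2).map (fun q => (q.2, nt p.1 q.1)))).foldl step d := by
  rw [List.foldl_flatMap]
  simp only [List.foldl_map]

theorem pv_getD_B {κ₁ κ₂ : Type} [BEq κ₁] [LawfulBEq κ₁] [DecidableEq κ₁] [BEq κ₂]
    (l : List (κ₁ × κ₂)) (d : PySem.Dict κ₁ (PySem.Dict κ₂ Int)) (k : κ₁) :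
    (l.foldl (fun c e => c.modify e.1 PySem.Dict.empty (fun m => m.insert e.2 (m.getD e.2 0 + 1))) d).getD k PySem.Dict.empty
      = ((l.filter (fun e => e.1 == k)).map (·.2)).foldl (fun m x => m.insert x (m.getD x 0 + 1)) (d.getD k PySem.Dict.empty) := by
  induction l generalizing d with
  | nil => rfl
  | cons e l ih =>
    simp only [List.foldl_cons, List.filter_cons]
    rw [ih]
    by_cases h : e.1 = k
    · subst h
      simp [PySem.Dict.modify]
    · simp [PySem.Dict.modify, PySem.Dict.getD_insert, h, Ne.symm h]

theorem pv_count_dict (d : PySem.Dict String (List String)) (h : d.keys.Nodup) :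
    count_dict_loop_seq d = PySem.Dict.mk (d.items.map (fun q => (q.1, PySem.Dict.counter q.2))) := by
  unfold count_dict_loop_seq
  have hinner : (fun (c : PySem.Dict String (PySem.Dict String Int)) (q : String × List String) =>
      if c.contains q.1 = true then c
      else c.insert q.1 (q.2.foldl (fun m v =>
        (if m.contains v = true then m else m.insert v 0).modify v 0 (· + 1)) PySem.Dict.empty))
      = (fun c q => if c.contains q.1 = true then c else c.insert q.1 (PySem.Dict.counter q.2)) := by
    funext c q
    have h2 : (fun (m : PySem.Dict String Int) (v : String) =>
        (if m.contains v = true then m else m.insert v 0).modify v 0 (· + 1))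
        = fun m v => m.insert v (m.getD v 0 + 1) := by
      funext m v
      exact pv_setdefault_modify m v 0 (· + 1)
    rw [h2, PySem.Dict.foldl_insert_getD_add_one_eq_counter]
  rw [hinner, pv_foldl_if_insert_fresh d.items (fun q => q.1) (fun q => PySem.Dict.counter q.2)
      PySem.Dict.empty (by intro a _; simp [pysem, PySem.Dict.empty]) h]
  apply PySem.Dict.ext
  rw [PySem.Dict.items_foldl_insert_fresh d.items (fun q => q.1) (fun q => PySem.Dict.counter q.2)
      PySem.Dict.empty (by intro a _; simp [pysem, PySem.Dict.empty]) h]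
  simp [PySem.Dict.empty]

theorem pv_nestedB (loops : List (List String)) (sequences : List String) :
    ((PySem.List.enumerate loops).foldl (fun c p =>
        (PySem.List.enumerate p.2).foldl (fun c q =>
          c.modify q.2 PySem.Dict.empty (fun m =>
            m.insert (String.ofList [((sequences.getD p.1.toNat "").toList.getD q.1.toNat ' ')])
              ((m.getD (String.ofList [((sequences.getD p.1.toNat "").toList.getD q.1.toNat ' ')]) 0) + 1))) c)
        (PySem.Dict.empty : PySem.Dict String (PySem.Dict String Int)))
      = (((PySem.List.enumerate loops).flatMap (fun p => (PySem.List.enumerate p.2).map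
          (fun q => (q.2, String.ofList [((sequences.getD p.1.toNat "").toList.getD q.1.toNat ' ')])))).foldl
          (fun c (e : String × String) => c.modify e.1 PySem.Dict.empty (fun m => m.insert e.2 (m.getD e.2 0 + 1)))
          PySem.Dict.empty) := by
  exact pv_nested (PySem.List.enumerate loops)
    (fun i j => String.ofList [((sequences.getD i.toNat "").toList.getD j.toNat ' ')])
    (fun (c : PySem.Dict String (PySem.Dict String Int)) (e : String × String) =>
      c.modify e.1 PySem.Dict.empty (fun m => m.insert e.2 (m.getD e.2 0 + 1)))
    PySem.Dict.empty

theorem pv_main (loops : List (List String)) (sequences : List String) :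
    (count_dict_loop_seq ((PySem.List.enumerate loops).foldl (fun d p =>
        (PySem.List.enumerate p.2).foldl (fun d q =>
          (if d.contains q.2 = true then d else d.insert q.2 []).modify q.2 []
            (fun l => l ++ [String.ofList [((sequences.getD p.1.toNat "").toList.getD q.1.toNat ' ')]])) d)
        PySem.Dict.empty)).items.map (fun q => (q.1, q.2.items))
    = ((PySem.List.enumerate loops).foldl (fun c p =>
        (PySem.List.enumerate p.2).foldl (fun c q =>
          c.modify q.2 PySem.Dict.empty (fun m =>
            m.insert (String.ofList [((sequences.getD p.1.toNat "").toList.getD q.1.toNat ' ')])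
              ((m.getD (String.ofList [((sequences.getD p.1.toNat "").toList.getD q.1.toNat ' ')]) 0) + 1))) c)
        (PySem.Dict.empty : PySem.Dict String (PySem.Dict String Int))).items.map (fun q => (q.1, q.2.items)) := by
  simp only [pv_setdefault_modify]
  have h1 := pv_nested (PySem.List.enumerate loops)
      (fun i j => String.ofList [((sequences.getD i.toNat "").toList.getD j.toNat ' ')])
      (fun c (e : String × String) => c.modify e.1 [] (fun l => l ++ [e.2])) PySem.Dict.empty
  dsimp only at h1
  rw [pv_nestedB loops sequences]
  rw [h1]
  generalize ((PySem.List.enumerate loops).flatMap _) = events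
  -- keys of both sides
  have hGkeys : ((events.foldl (fun c (e : String × String) => c.modify e.1 [] (fun l => l ++ [e.2])) PySem.Dict.empty)).keys
      = PySem.Set.update PySem.Dict.empty.keys (events.map (fun e => e.1)) :=
    PySem.Dict.keys_foldl_modify_key events (fun e => e.1) [] (fun _ e => fun l => l ++ [e.2]) PySem.Dict.empty
  have hCkeys : ((events.foldl (fun c (e : String × String) => c.modify e.1 PySem.Dict.empty (fun m => m.insert e.2 (m.getD e.2 0 + 1))) (PySem.Dict.empty : PySem.Dict String (PySem.Dict String Int)))).keys
      = PySem.Set.update PySem.Dict.empty.keys (events.map (fun e => e.1)) :=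
    PySem.Dict.keys_foldl_modify_key events (fun e => e.1) PySem.Dict.empty
      (fun _ e => fun m => m.insert e.2 (m.getD e.2 0 + 1)) PySem.Dict.empty
  have hGnodup : ((events.foldl (fun c (e : String × String) => c.modify e.1 [] (fun l => l ++ [e.2])) PySem.Dict.empty)).keys.Nodup :=
    PySem.Dict.nodup_keys_foldl_modify_key events (fun e => e.1) [] (fun _ e => fun l => l ++ [e.2])
      PySem.Dict.empty (by simp [PySem.Dict.empty, PySem.Dict.keys])
  have hCnodup : ((events.foldl (fun c (e : String × String) => c.modify e.1 PySem.Dict.empty (fun m => m.insert e.2 (m.getD e.2 0 + 1))) (PySem.Dict.empty : PySem.Dict String (PySem.Dict String Int)))).keys.Nodup :=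
    PySem.Dict.nodup_keys_foldl_modify_key events (fun e => e.1) PySem.Dict.empty
      (fun _ e => fun m => m.insert e.2 (m.getD e.2 0 + 1)) PySem.Dict.empty (by simp [PySem.Dict.empty, PySem.Dict.keys])
  rw [pv_count_dict _ hGnodup]
  have hitems : (PySem.Dict.mk (((events.foldl (fun c (e : String × String) => c.modify e.1 [] (fun l => l ++ [e.2])) PySem.Dict.empty)).items.map
      (fun q => (q.1, PySem.Dict.counter q.2)))).items
      = ((events.foldl (fun c (e : String × String) => c.modify e.1 [] (fun l => l ++ [e.2])) PySem.Dict.empty)).items.map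
      (fun q => (q.1, PySem.Dict.counter q.2)) := rfl
  rw [hitems]
  rw [PySem.Dict.items_eq_map_keys _ hGnodup []]
  conv_rhs => rw [PySem.Dict.items_eq_map_keys _ hCnodup PySem.Dict.empty]
  rw [hGkeys, hCkeys]
  simp only [List.map_map]
  apply List.map_congr_left
  intro k _
  simp only [Function.comp]
  have hG : ((events.foldl (fun c (e : String × String) => c.modify e.1 [] (fun l => l ++ [e.2])) PySem.Dict.empty)).getD k []
      = ((events.filter (fun e => e.1 == k)).map (fun e => e.2)) := by
    rw [PySem.Dict.getD_foldl_modify_append events PySem.Dict.empty k]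
    simp [PySem.Dict.empty, PySem.Dict.getD, PySem.Dict.get?]
  have hC : ((events.foldl (fun c (e : String × String) => c.modify e.1 PySem.Dict.empty (fun m => m.insert e.2 (m.getD e.2 0 + 1))) (PySem.Dict.empty : PySem.Dict String (PySem.Dict String Int)))).getD k PySem.Dict.empty
      = PySem.Dict.counter ((events.filter (fun e => e.1 == k)).map (fun e => e.2)) := by
    rw [pv_getD_B events PySem.Dict.empty k]
    have : (PySem.Dict.empty : PySem.Dict String (PySem.Dict String Int)).getD k PySem.Dict.empty = PySem.Dict.empty := by
      simp [PySem.Dict.empty, PySem.Dict.getD, PySem.Dict.get?]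
    rw [this, PySem.Dict.foldl_insert_getD_add_one_eq_counter]
  rw [hG, hC]

-- ===== VERDICT (by name: the statement is the Claim_ definition above) =====
theorem count_nt_pred_JP_spec : Claim_equal_count_nt_pred_JP := by
  intro jp_pred data_train _ _
  unfold Spec_count_nt_pred_JP count_nt_pred_JP count_nt_pred_JP_alt
  cases hl : List.lookup "loop_pred" jp_pred <;>
    cases hs : List.lookup "sequence" data_train <;>
    first
      | rfl
      | (dsimp only; exact pv_main _ _)
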